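-- pv_equiv track=rewrite | github.com/honyacho/atcoder_excercise | arc024/b.py | getM
-- ===== SOURCE A (Python) =====
-- def getM(b):
--     mx = 0
--     cur = -1
--     cnt = 0
--     for v in b:
--         if v != cur:
--             cur = v
--             cnt = 0
--         cnt += 1
--         mx = max(mx, cnt)
--     return mx
-- ===== SOURCE B (Python) =====
-- def getM(b):
--     n = len(b)
--     best = 0
--     i = 0
--     while i < n:
--         k = i + 1
--         while k < n and b[k] == b[i]:
--             k += 1
--         best = max(best, k - i)
--         i = k
--     return best
-- ===== Notes on version B (the rewrite author's own statement) =====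
-- stated objective: alternative
-- what changed: B decomposes the list into maximal runs with a nested boundary-scanning loop (an inner while advances k to the end of the current run, then best is updated with the run length k - i) instead of A's single element-wise pass tracking current value, running count and running max.
import Mathlib
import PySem

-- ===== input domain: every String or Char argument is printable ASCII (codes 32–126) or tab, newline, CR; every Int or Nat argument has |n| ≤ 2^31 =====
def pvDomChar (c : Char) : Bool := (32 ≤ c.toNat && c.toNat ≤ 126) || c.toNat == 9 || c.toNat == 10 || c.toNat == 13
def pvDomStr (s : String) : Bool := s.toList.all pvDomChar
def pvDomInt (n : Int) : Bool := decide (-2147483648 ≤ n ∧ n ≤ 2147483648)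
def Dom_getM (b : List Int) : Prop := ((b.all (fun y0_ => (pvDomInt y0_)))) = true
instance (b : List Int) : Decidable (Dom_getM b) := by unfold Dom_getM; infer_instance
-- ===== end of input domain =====

-- B splits the list into maximal runs with a nested boundary scan and maxes the run lengths,
-- instead of A's one-pass loop tracking current value, running count and running max. Objective: alternative.

-- ===== PORT A =====
-- A's for-loop over state (mx, cur, cnt), as the obvious structural recursion
def getM_go (mx cur cnt : Int) : List Int → Int
  | [] => mx
  | v :: t =>
    if v ≠ cur then getM_go (max mx (0 + 1)) v (0 + 1) t
    else getM_go (max mx (cnt + 1)) cur (cnt + 1) t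

def getM (b : List Int) : Int := getM_go 0 (-1) 0 b

-- ===== PORT B =====
-- B's inner while 'k = i + 1; while k < n and b[k] == b[i]: k += 1' scans to the end of the
-- current run: at the suffix starting at i this counts the equal prefix of its tail (k - i - 1)
def getM_pref (x : Int) : List Int → Nat
  | [] => 0
  | y :: t => if y = x then getM_pref x t + 1 else 0

-- B's outer while over state (best, position i), the position rendered as the remaining suffix
def getM_alt_go (best : Int) : List Int → Int
  | [] => best
  | v :: t =>
    let m := getM_pref v t
    getM_alt_go (max best ((m : Int) + 1)) (t.drop m)
termination_by l => l.length
decreasing_by simp [List.length_drop]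

def getM_alt (b : List Int) : Int := getM_alt_go 0 b

-- ===== PRECONDITION & SPEC =====
def Spec_getM (b : List Int) (out : Int) : Prop := out = getM_alt b
instance (b : List Int) (out : Int) : Decidable (Spec_getM b out) := by unfold Spec_getM; infer_instance

-- ===== CLAIM (what is proved, stated in full; the proofs are below) =====
def Claim_equal_getM : Prop := ∀ (b : List Int), Dom_getM b → Spec_getM b (getM b)

-- ===== LEMMAS AND PROOFS =====

theorem getM_alt_go_nil (best : Int) : getM_alt_go best [] = best := by rw [getM_alt_go.eq_def]

theorem getM_alt_go_cons (best v : Int) (t : List Int) :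
    getM_alt_go best (v :: t)
      = getM_alt_go (max best ((getM_pref v t : Int) + 1)) (t.drop (getM_pref v t)) := by
  rw [getM_alt_go.eq_def]

-- with cnt = 0 the first step of A's loop is the same for any cur
theorem getM_go_step0 (M cur w : Int) (r : List Int) :
    getM_go M cur 0 (w :: r) = getM_go (max M 1) w 1 r := by
  by_cases h : w = cur <;> simp [getM_go, h]

-- A's loop consuming a maximal run of the current value
theorem getM_go_run (t : List Int) : ∀ (mx v cnt : Int), cnt ≤ mx →
    getM_go mx v cnt t
      = getM_go (max mx (cnt + (getM_pref v t : Int))) v (cnt + (getM_pref v t : Int))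
          (t.drop (getM_pref v t)) := by
  induction t with
  | nil =>
    intro mx v cnt h
    simp [getM_pref, getM_go, max_eq_left h]
  | cons y t ih =>
    intro mx v cnt h
    by_cases hy : y = v
    · have hstep : getM_go mx v cnt (y :: t) = getM_go (max mx (cnt + 1)) v (cnt + 1) t := by
        simp [getM_go, hy]
      have hp : getM_pref v (y :: t) = getM_pref v t + 1 := by simp [getM_pref, hy]
      have hd : (y :: t).drop (getM_pref v t + 1) = t.drop (getM_pref v t) := rfl
      rw [hstep, ih (max mx (cnt + 1)) v (cnt + 1) (le_max_right _ _), hp, hd]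
      have h0 : (0:Int) ≤ (getM_pref v t : Int) := Int.natCast_nonneg _
      have e2 : max (max mx (cnt + 1)) (cnt + 1 + (getM_pref v t : Int))
          = max mx (cnt + ((getM_pref v t : Int) + 1)) := by
        rw [max_assoc, max_eq_right (by omega : cnt + 1 ≤ cnt + 1 + (getM_pref v t : Int))]
        congr 1
        ring
      rw [e2]
      have e1 : cnt + 1 + (getM_pref v t : Int) = cnt + ((getM_pref v t : Int) + 1) := by ring
      rw [e1]
      push_cast
      ring_nf
    · have hp : getM_pref v (y :: t) = 0 := by simp [getM_pref, hy]
      simp [hp, max_eq_left h]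

-- the element after the run differs from the run's value
theorem getM_pref_drop (t : List Int) : ∀ (v : Int),
    t.drop (getM_pref v t) = [] ∨
      ∃ w r, t.drop (getM_pref v t) = w :: r ∧ w ≠ v := by
  induction t with
  | nil => intro v; left; rfl
  | cons y t ih =>
    intro v
    by_cases hy : y = v
    · simpa [getM_pref, hy] using ih v
    · right; exact ⟨y, t, by simp [getM_pref, hy], hy⟩

theorem getM_main (n : Nat) : ∀ (l : List Int), l.length ≤ n → ∀ (mx cur : Int),
    getM_go mx cur 0 l = getM_alt_go mx l := by
  induction n with
  | zero =>
    intro l hl mx cur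
    have : l = [] := List.eq_nil_of_length_eq_zero (Nat.le_zero.mp hl)
    subst this
    rw [getM_alt_go_nil]
    rfl
  | succ n ih =>
    intro l hl mx cur
    cases l with
    | nil => rw [getM_alt_go_nil]; rfl
    | cons v t =>
      have h0 : (0:Int) ≤ (getM_pref v t : Int) := Int.natCast_nonneg _
      rw [getM_go_step0]
      rw [getM_go_run t (max mx 1) v 1 (le_max_right _ _)]
      have habs : max (max mx 1) (1 + (getM_pref v t : Int)) = max mx (1 + (getM_pref v t : Int)) := by
        rw [max_assoc, max_eq_right (by omega : (1:Int) ≤ 1 + (getM_pref v t : Int))]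
      have hcomm : (1 : Int) + (getM_pref v t : Int) = (getM_pref v t : Int) + 1 := by ring
      rw [habs, getM_alt_go_cons, ← hcomm]
      rcases getM_pref_drop t v with hnil | ⟨w, r, hdrop, hwv⟩
      · rw [hnil, getM_alt_go_nil]
        rfl
      · rw [hdrop]
        have hstep : getM_go (max mx (1 + (getM_pref v t : Int))) v (1 + (getM_pref v t : Int)) (w :: r)
            = getM_go (max mx (1 + (getM_pref v t : Int))) v 0 (w :: r) := by
          rw [getM_go_step0]
          simp [getM_go, hwv]
        rw [hstep]
        have hlen : (w :: r).length ≤ n := by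
          have h1 : (w :: r).length = (t.drop (getM_pref v t)).length := by rw [hdrop]
          have h2 : (t.drop (getM_pref v t)).length ≤ t.length := by
            rw [List.length_drop]; omega
          have h3 : t.length + 1 ≤ n + 1 := by simpa using hl
          omega
        exact ih (w :: r) hlen (max mx (1 + (getM_pref v t : Int))) v

-- ===== VERDICT (by name: the statement is the Claim_ definition above) =====
theorem getM_spec : Claim_equal_getM := by
  intro b _
  unfold Spec_getM getM getM_alt
  exact getM_main b.length b le_rfl 0 (-1)
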